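-- pv_equiv track=rewrite | github.com/kekeboomboom/getOutVideo_fastapi | backend/app/video_processor/service.py | _choose_language_priority
-- ===== SOURCE A (Python) =====
-- def _choose_language_priority(available_languages: list[str]) -> list[str] | None:
--     if not available_languages:
--         return None
--
--     unique_languages = list(dict.fromkeys(available_languages))
--     chinese = [code for code in unique_languages if code.lower().startswith("zh")]
--     english = [code for code in unique_languages if code.lower().startswith("en")]
--
--     if chinese:
--         prioritized = chinese
--     elif english:
--         prioritized = english
--     else:
--         prioritized = [unique_languages[0]]
--
--     remainder = [code for code in unique_languages if code not in prioritized]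
--     return prioritized + remainder
-- ===== SOURCE B (Python) =====
-- def _choose_language_priority(available_languages):
--     if not available_languages:
--         return None
--     unique_languages = list(dict.fromkeys(available_languages))
--     if any(code.lower().startswith("zh") for code in unique_languages):
--         is_priority = lambda code: code.lower().startswith("zh")
--     elif any(code.lower().startswith("en") for code in unique_languages):
--         is_priority = lambda code: code.lower().startswith("en")
--     else:
--         first = unique_languages[0]
--         is_priority = lambda code: code == first
--     return sorted(unique_languages, key=lambda code: 0 if is_priority(code) else 1)
-- ===== Notes on version B (the rewrite author's own statement) =====
-- stated objective: alternative
-- what changed: Replaces A's two filter comprehensions plus a 'code not in prioritized' membership scan by deciding a single priority predicate (any zh, else any en, else the first unique code) and then one stable sort of the unique codes by a binary rank (0 = prioritized, 1 = rest).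
import Mathlib
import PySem

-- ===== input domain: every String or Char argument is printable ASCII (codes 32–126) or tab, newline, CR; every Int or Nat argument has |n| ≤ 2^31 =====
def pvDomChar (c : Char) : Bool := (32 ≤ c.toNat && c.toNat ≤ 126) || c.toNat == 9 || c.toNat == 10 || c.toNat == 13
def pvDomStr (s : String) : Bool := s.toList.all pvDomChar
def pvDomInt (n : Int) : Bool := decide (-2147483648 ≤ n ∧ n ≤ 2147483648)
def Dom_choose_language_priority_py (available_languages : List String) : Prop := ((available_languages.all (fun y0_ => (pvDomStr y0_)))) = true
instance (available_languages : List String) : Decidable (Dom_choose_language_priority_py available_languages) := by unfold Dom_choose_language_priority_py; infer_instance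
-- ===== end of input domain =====

-- B decides one priority predicate and stably sorts the unique codes by a binary rank,
-- instead of A's two filter passes plus a 'code not in prioritized' membership scan (objective: alternative).

-- ===== PORT A =====
def choose_language_priority_py (available_languages : List String) : Option (List String) :=
  if available_languages = [] then none
  else
    let unique_languages := PySem.List.dedup available_languages
    let chinese := unique_languages.filter (fun code => PySem.Str.startswith (PySem.Str.lower code) "zh")
    let english := unique_languages.filter (fun code => PySem.Str.startswith (PySem.Str.lower code) "en")
    let prioritized :=
      if chinese ≠ [] then chinese
      else if english ≠ [] then english
      else [PySem.List.pyGetD unique_languages 0 ""]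
    let remainder := unique_languages.filter (fun code => !(prioritized.contains code))
    some (prioritized ++ remainder)

-- ===== PORT B =====
def choose_language_priority_py_alt (available_languages : List String) : Option (List String) :=
  if available_languages = [] then none
  else
    let unique_languages := PySem.List.dedup available_languages
    let is_priority : String → Bool :=
      if unique_languages.any (fun code => PySem.Str.startswith (PySem.Str.lower code) "zh") then
        fun code => PySem.Str.startswith (PySem.Str.lower code) "zh"
      else if unique_languages.any (fun code => PySem.Str.startswith (PySem.Str.lower code) "en") then
        fun code => PySem.Str.startswith (PySem.Str.lower code) "en"
      else
        fun code => code == PySem.List.pyGetD unique_languages 0 ""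
    some (PySem.List.sorted unique_languages (fun code => if is_priority code then (0:Int) else 1) false)


-- ===== PRECONDITION & SPEC =====
def Spec_choose_language_priority_py (available_languages : List String) (out : Option (List String)) : Prop := out = choose_language_priority_py_alt available_languages
instance (available_languages : List String) (out : Option (List String)) : Decidable (Spec_choose_language_priority_py available_languages out) := by unfold Spec_choose_language_priority_py; infer_instance

-- ===== CLAIM (what is proved, stated in full; the proofs are below) =====
def Claim_equal_choose_language_priority_py : Prop := ∀ (available_languages : List String), Dom_choose_language_priority_py available_languages → Spec_choose_language_priority_py available_languages (choose_language_priority_py available_languages)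

-- ===== LEMMAS AND PROOFS =====
-- insertBy of a binary-ranked element into a partitioned list
theorem insertBy_rank_true {α : Type} (p : α → Bool) (x : α) (hx : p x = true)
    (A B : List α) (hA : ∀ a ∈ A, p a = true) (hB : ∀ b ∈ B, p b = false) :
    PySem.List.insertBy
      (fun a b => decide ((if p a then (0:Int) else 1) < (if p b then (0:Int) else 1)))
      x (A ++ B) = A ++ x :: B := by
  induction A with
  | nil =>
    cases B with
    | nil => rfl
    | cons b bs =>
      have hb := hB b (by simp)
      simp [PySem.List.insertBy, hx, hb]
  | cons a as ih =>
    have ha := hA a (by simp)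
    simp only [List.cons_append, PySem.List.insertBy, hx, ha]
    simp [ih (fun a h => hA a (by simp [h]))]

theorem insertBy_rank_false {α : Type} (p : α → Bool) (x : α) (hx : p x = false)
    (l : List α) :
    PySem.List.insertBy
      (fun a b => decide ((if p a then (0:Int) else 1) < (if p b then (0:Int) else 1)))
      x l = l ++ [x] := by
  apply PySem.List.insertBy_of_forall_not_before
  intro y _
  by_cases hy : p y = true <;> simp [hx, hy]

theorem sorted_binary_rank {α : Type} (p : α → Bool) (l : List α) :
    PySem.List.sorted l (fun c => if p c then (0:Int) else 1) false
      = l.filter p ++ l.filter (fun c => !p c) := by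
  induction l using List.reverseRecOn with
  | nil => rfl
  | append_singleton l x ih =>
    rw [PySem.List.sorted_eq_foldl_insertBy] at ih ⊢
    rw [List.foldl_append, List.foldl_cons, List.foldl_nil, ih]
    by_cases hx : p x = true
    · rw [insertBy_rank_true p x hx _ _ (fun a h => List.of_mem_filter h)
        (fun b h => by simpa using List.of_mem_filter h)]
      simp [List.filter_append, hx]
    · rw [insertBy_rank_false p x (by simpa using hx)]
      simp [List.filter_append, hx]

theorem contains_filter_eq {p : String → Bool} {u : List String} {c : String} (hc : c ∈ u) :
    (u.filter p).contains c = p c := by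
  by_cases h : p c = true <;> simp [List.mem_filter, hc, h]


theorem filter_not_contains_filter (p : String → Bool) (u : List String) :
    List.filter (fun code => !(List.filter p u).contains code) u = List.filter (fun c => !p c) u :=
  List.filter_congr (fun c hc => by rw [contains_filter_eq hc])


-- ===== VERDICT (by name: the statement is the Claim_ definition above) =====
theorem choose_language_priority_py_spec : Claim_equal_choose_language_priority_py := by
  unfold Claim_equal_choose_language_priority_py Spec_choose_language_priority_py
  intro l _
  by_cases h : l = []
  · simp [choose_language_priority_py, choose_language_priority_py_alt, h]
  · simp only [choose_language_priority_py, choose_language_priority_py_alt, if_neg h]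
    set u := PySem.List.dedup l with hu
    have hnodup : u.Nodup := PySem.List.nodup_dedup l
    have hune : u ≠ [] := by
      obtain ⟨a, t, rfl⟩ := List.exists_cons_of_ne_nil h
      have : a ∈ u := by rw [hu, PySem.List.mem_dedup]; simp
      exact List.ne_nil_of_mem this
    set zh : String → Bool := fun code => PySem.Str.startswith (PySem.Str.lower code) "zh" with hzh
    set en : String → Bool := fun code => PySem.Str.startswith (PySem.Str.lower code) "en" with hen
    by_cases h1 : u.any zh = true
    · have hfil : u.filter zh ≠ [] := by
        rw [List.any_eq_true] at h1
        obtain ⟨x, hx, hpx⟩ := h1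
        exact List.ne_nil_of_mem (List.mem_filter.mpr ⟨hx, hpx⟩)
      rw [if_pos h1, if_pos hfil, sorted_binary_rank, filter_not_contains_filter]
    · have hfil : ¬ (u.filter zh ≠ []) := by
        simp only [ne_eq, not_not, List.filter_eq_nil_iff]
        intro a ha
        simp only [List.any_eq_true, not_exists, not_and] at h1
        simp [h1 a ha]
      rw [if_neg h1, if_neg hfil]
      by_cases h2 : u.any en = true
      · have hfil2 : u.filter en ≠ [] := by
          rw [List.any_eq_true] at h2
          obtain ⟨x, hx, hpx⟩ := h2
          exact List.ne_nil_of_mem (List.mem_filter.mpr ⟨hx, hpx⟩)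
        rw [if_pos h2, if_pos hfil2, sorted_binary_rank, filter_not_contains_filter]
      · have hfil2 : ¬ (u.filter en ≠ []) := by
          simp only [ne_eq, not_not, List.filter_eq_nil_iff]
          intro a ha
          simp only [List.any_eq_true, not_exists, not_and] at h2
          simp [h2 a ha]
        rw [if_neg h2, if_neg hfil2, sorted_binary_rank]
        clear_value u
        obtain ⟨a, t, rfl⟩ := List.exists_cons_of_ne_nil hune
        have hat : a ∉ t := (List.nodup_cons.mp hnodup).1
        have hget : PySem.List.pyGetD (a :: t) 0 "" = a := by
          simp [PySem.List.pyGetD]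
        rw [hget]
        have hft : t.filter (fun c => c == a) = [] := by
          rw [List.filter_eq_nil_iff]
          intro b hb
          simp only [beq_iff_eq]
          exact fun hba => hat (hba ▸ hb)
        have hftr : t.filter (fun c => !(c == a)) = t := by
          rw [List.filter_eq_self]
          intro b hb
          simp only [Bool.not_eq_eq_eq_not, Bool.not_true, beq_eq_false_iff_ne, ne_eq]
          exact fun hba => hat (hba ▸ hb)
        have hrem : (a :: t).filter (fun code => !([a].contains code)) = t := by
          simp only [List.filter_cons, List.contains_cons, List.contains_nil,
            beq_self_eq_true, Bool.or_false, Bool.not_true, Bool.false_eq_true, if_false]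
          rw [List.filter_eq_self]
          intro b hb
          simp only [Bool.not_eq_eq_eq_not, Bool.not_true, beq_eq_false_iff_ne, ne_eq]
          exact fun hba => hat (hba ▸ hb)
        rw [hrem]
        simp only [List.filter_cons, beq_self_eq_true, Bool.not_true, if_true, hft, hftr]
        rfl
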